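-- pv_equiv track=rewrite | github.com/Bazinga9000/Polytris | Polyominoes.py | vitals
-- ===== SOURCE A (Python) =====
-- def vitals(poly):
--
--     stats = []
--
--     stats.append(max([i[0] for i in poly])) #max column
--     stats.append(min([i[0] for i in poly])) #min column
--     stats.append(stats[0] - stats[1] + 1) #length
--
--     stats.append(max([i[1] for i in poly]))  # max row
--     stats.append(min([i[1] for i in poly]))  # min row
--     stats.append(stats[3] - stats[4] + 1)  # height
--
--     return stats
-- ===== SOURCE B (Python) =====
-- def vitals(poly):
--     it = iter(poly)
--     try:
--         c, r = next(it)
--     except StopIteration: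
--         raise ValueError("vitals() arg is an empty sequence")
--     max_c = min_c = c
--     max_r = min_r = r
--     for c, r in it:
--         if c > max_c:
--             max_c = c
--         if c < min_c:
--             min_c = c
--         if r > max_r:
--             max_r = r
--         if r < min_r:
--             min_r = r
--     return [max_c, min_c, max_c - min_c + 1, max_r, min_r, max_r - min_r + 1]
-- ===== Notes on version B (the rewrite author's own statement) =====
-- stated objective: alternative
-- what changed: Replaces four separate list-comprehension scans with max()/min() by one fused pass maintaining four running extrema accumulators.
import Mathlib
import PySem

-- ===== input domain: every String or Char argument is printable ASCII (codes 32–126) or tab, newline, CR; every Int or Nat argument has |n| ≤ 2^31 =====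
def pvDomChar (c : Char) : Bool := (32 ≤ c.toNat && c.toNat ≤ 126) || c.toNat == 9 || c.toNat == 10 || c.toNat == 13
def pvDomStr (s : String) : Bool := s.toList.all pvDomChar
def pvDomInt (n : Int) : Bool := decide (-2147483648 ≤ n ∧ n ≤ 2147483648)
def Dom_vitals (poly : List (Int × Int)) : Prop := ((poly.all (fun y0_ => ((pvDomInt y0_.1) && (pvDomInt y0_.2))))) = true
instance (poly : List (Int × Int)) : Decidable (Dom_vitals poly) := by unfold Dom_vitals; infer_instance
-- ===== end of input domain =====

-- B replaces A's four separate max()/min() scans by one fused pass with four running extrema accumulators (objective: alternative).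

-- ===== PORT A =====
-- max([i[0] for i in poly]) etc.: Python max/min with no key = PySem.List.max?/min? with identity key;
-- none (Python's ValueError on an empty list) is excluded by Pre_vitals, the [] branch is unreachable there.
def vitals (poly : List (Int × Int)) : List Int :=
  match PySem.List.max? (poly.map (fun i => i.1)) (fun x => x),
        PySem.List.min? (poly.map (fun i => i.1)) (fun x => x),
        PySem.List.max? (poly.map (fun i => i.2)) (fun x => x),
        PySem.List.min? (poly.map (fun i => i.2)) (fun x => x) with
  | some mc, some nc, some mr, some nr => [mc, nc, mc - nc + 1, mr, nr, mr - nr + 1]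
  | _, _, _, _ => []

-- ===== PORT B =====
-- the for-loop of Source B over the rest of the iterator, carrying the four accumulators
def vitalsAltLoop (t : List (Int × Int)) (mc nc mr nr : Int) : Int × Int × Int × Int :=
  match t with
  | [] => (mc, nc, mr, nr)
  | (c, r) :: t' =>
      vitalsAltLoop t' (if c > mc then c else mc) (if c < nc then c else nc)
                       (if r > mr then r else mr) (if r < nr then r else nr)

def vitals_alt (poly : List (Int × Int)) : List Int :=
  match poly with
  | [] => []   -- Source B raises ValueError here; excluded by Pre_vitals
  | (c, r) :: t =>
      match vitalsAltLoop t c c r r with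
      | (mc, nc, mr, nr) => [mc, nc, mc - nc + 1, mr, nr, mr - nr + 1]

-- ===== PRECONDITION & SPEC =====
-- Pre_ excludes the empty list, on which both A and B raise ValueError (max() of an empty sequence).
def Pre_vitals (poly : List (Int × Int)) : Prop := poly ≠ []
instance (poly : List (Int × Int)) : Decidable (Pre_vitals poly) := by unfold Pre_vitals; infer_instance

def pvWitness_vitals : (List (Int × Int)) := [(1, 2), (-3, 5)]

def Spec_vitals (poly : List (Int × Int)) (out : List Int) : Prop := out = vitals_alt poly
instance (poly : List (Int × Int)) (out : List Int) : Decidable (Spec_vitals poly out) := by unfold Spec_vitals; infer_instance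

-- ===== CLAIM (what is proved, stated in full; the proofs are below) =====
def Claim_equal_vitals : Prop := ∀ (poly : List (Int × Int)), Dom_vitals poly → Pre_vitals poly → Spec_vitals poly (vitals poly)

-- ===== LEMMAS AND PROOFS =====

theorem if_gt_eq_max (a b : Int) : (if b > a then b else a) = max a b := by
  rw [max_def]; split_ifs <;> omega

theorem if_lt_eq_min (a b : Int) : (if b < a then b else a) = min a b := by
  rw [min_def]; split_ifs <;> omega

theorem vitalsAltLoop_eq (t : List (Int × Int)) (mc nc mr nr : Int) :
    vitalsAltLoop t mc nc mr nr =
      ((t.map (fun i => i.1)).foldl max mc, (t.map (fun i => i.1)).foldl min nc,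
       (t.map (fun i => i.2)).foldl max mr, (t.map (fun i => i.2)).foldl min nr) := by
  induction t generalizing mc nc mr nr with
  | nil => rfl
  | cons x t ih =>
      obtain ⟨c, r⟩ := x
      simp [vitalsAltLoop, List.map, ih, if_gt_eq_max, if_lt_eq_min]

-- ===== VERDICT (by name: the statement is the Claim_ definition above) =====
theorem vitals_spec : Claim_equal_vitals := by
  intro poly _ hpre
  unfold Spec_vitals
  match poly with
  | [] => exact absurd rfl hpre
  | (c, r) :: t =>
      simp only [vitals, vitals_alt, List.map,
        PySem.List.max?_id_cons, PySem.List.min?_id_cons, vitalsAltLoop_eq]
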